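-- pv_equiv track=rewrite | github.com/AdamSlack/Advent-Of-Code | 2023/02/main.py | calculate_minimum_bag_contents
-- ===== SOURCE A (Python) =====
-- def calculate_minimum_bag_contents(games):
--   minimum_bag_contents = {}
--   for game in games:
--     minimum_bag_contents[game] = {}
--     for round in games[game]:
--       for colour in round:
--         if colour not in minimum_bag_contents[game]:
--           minimum_bag_contents[game][colour] = round[colour]
--         elif round[colour] > minimum_bag_contents[game][colour]:
--           minimum_bag_contents[game][colour] = round[colour]
--   return minimum_bag_contents
-- ===== SOURCE B (Python) =====
-- def calculate_minimum_bag_contents(games):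
--   result = {}
--   for game, rounds in games.items():
--     colours = dict.fromkeys(c for r in rounds for c in r)
--     result[game] = {c: max(r[c] for r in rounds if c in r) for c in colours}
--   return result
-- ===== Notes on version B (the rewrite author's own statement) =====
-- stated objective: alternative
-- what changed: Flips the loop nesting: instead of a running if/elif maximum updated round-by-round per colour, B first collects each game's distinct colours and then computes each colour's value as a filtered max() over the rounds; Pre_ only excludes association lists with duplicate colour keys inside one round, which cannot arise from a Python dict argument.
import Mathlib
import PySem

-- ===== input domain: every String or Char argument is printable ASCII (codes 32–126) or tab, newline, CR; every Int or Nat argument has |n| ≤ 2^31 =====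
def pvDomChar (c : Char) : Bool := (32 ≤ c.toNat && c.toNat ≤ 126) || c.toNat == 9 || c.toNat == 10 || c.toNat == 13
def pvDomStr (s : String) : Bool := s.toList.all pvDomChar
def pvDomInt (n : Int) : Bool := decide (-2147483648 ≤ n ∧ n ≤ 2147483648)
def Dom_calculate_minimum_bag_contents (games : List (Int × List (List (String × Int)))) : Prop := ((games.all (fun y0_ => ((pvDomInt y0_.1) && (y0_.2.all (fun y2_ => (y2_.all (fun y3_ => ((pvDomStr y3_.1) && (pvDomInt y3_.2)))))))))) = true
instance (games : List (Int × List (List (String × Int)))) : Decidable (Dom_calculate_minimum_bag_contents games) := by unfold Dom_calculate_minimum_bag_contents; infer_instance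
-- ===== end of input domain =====

-- B flips the loop nesting: it collects each game's distinct colours first, then takes a
-- filtered max over the rounds per colour (objective: alternative decomposition, same cost).


-- ===== PORT A =====
-- one pair (colour, count) of a round, run through A's if/elif maximum update
def pvAStep (d : PySem.Dict String Int) (p : String × Int) : PySem.Dict String Int :=
  if d.contains p.1 = false then d.insert p.1 p.2
  else if d.getD p.1 0 < p.2 then d.insert p.1 p.2  -- round[colour] > mbc[game][colour]
  else d

-- the inner dict A builds for one game; Python mutates minimum_bag_contents[game] in place,
-- which (the key being written only while its game is processed) is building this dict and
-- inserting it once per occurrence of the game key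
def pvAInner (rounds : List (List (String × Int))) : PySem.Dict String Int :=
  rounds.foldl (fun d round => round.foldl pvAStep d) PySem.Dict.empty

def calculate_minimum_bag_contents (games : List (Int × List (List (String × Int)))) : List (Int × List (String × Int)) :=
  (games.foldl (fun (acc : PySem.Dict Int (PySem.Dict String Int)) g =>
      acc.insert g.1 (pvAInner g.2)) PySem.Dict.empty).items.map (fun p => (p.1, p.2.items))

-- ===== PORT B =====
-- {c: max(r[c] for r in rounds if c in r) for c in dict.fromkeys(colours of all rounds)}
-- Python's max over a generator of ints; the generator is nonempty for every collected colour,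
-- so the .getD 0 default is never the returned value
def pvBInner (rounds : List (List (String × Int))) : List (String × Int) :=
  (PySem.List.dedup (rounds.flatMap (fun r => r.map Prod.fst))).map (fun c =>
    (c, (PySem.List.max? ((rounds.filter (fun r => (r.lookup c).isSome)).map
          (fun r => (r.lookup c).getD 0)) id).getD 0))

def calculate_minimum_bag_contents_alt (games : List (Int × List (List (String × Int)))) : List (Int × List (String × Int)) :=
  (games.foldl (fun (acc : PySem.Dict Int (List (String × Int))) g =>
      acc.insert g.1 (pvBInner g.2)) PySem.Dict.empty).items

-- ===== PRECONDITION & SPEC =====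
-- Pre_ excludes association lists in which one round carries the same colour key twice:
-- a Python dict cannot contain duplicate keys, so no Python input reaches such lists.
def Pre_calculate_minimum_bag_contents (games : List (Int × List (List (String × Int)))) : Prop :=
  ∀ g ∈ games, ∀ round ∈ g.2, (round.map Prod.fst).Nodup
instance (games : List (Int × List (List (String × Int)))) : Decidable (Pre_calculate_minimum_bag_contents games) := by unfold Pre_calculate_minimum_bag_contents; infer_instance

def pvWitness_calculate_minimum_bag_contents : (List (Int × List (List (String × Int)))) :=
  [(1, [[("red", 3), ("blue", 1)], [("red", 5)]]), (2, [])]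

def Spec_calculate_minimum_bag_contents (games : List (Int × List (List (String × Int)))) (out : List (Int × List (String × Int))) : Prop := out = calculate_minimum_bag_contents_alt games
instance (games : List (Int × List (List (String × Int)))) (out : List (Int × List (String × Int))) : Decidable (Spec_calculate_minimum_bag_contents games out) := by unfold Spec_calculate_minimum_bag_contents; infer_instance

-- ===== CLAIM (what is proved, stated in full; the proofs are below) =====
def Claim_equal_calculate_minimum_bag_contents : Prop := ∀ (games : List (Int × List (List (String × Int)))), Dom_calculate_minimum_bag_contents games → Pre_calculate_minimum_bag_contents games → Spec_calculate_minimum_bag_contents games (calculate_minimum_bag_contents games)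

-- ===== LEMMAS AND PROOFS =====

-- the Option-valued maximum step that A's if/elif performs at one colour
def pvMaxStep (o : Option Int) (v : Int) : Option Int :=
  match o with
  | none => some v
  | some w => if w < v then some v else some w

theorem pvAStep_get? (d : PySem.Dict String Int) (p : String × Int) (c : String) :
    (pvAStep d p).get? c = if c = p.1 then pvMaxStep (d.get? c) p.2 else d.get? c := by
  obtain ⟨k, v⟩ := p
  unfold pvAStep
  by_cases hc : c = k
  · subst hc
    simp only
    rw [PySem.Dict.contains_eq_isSome_get?]
    cases h : d.get? c with
    | none => simp [pvMaxStep, PySem.Dict.get?_insert_self]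
    | some w =>
      rw [PySem.Dict.getD_eq_get?_getD, h]
      simp only [Option.isSome_some, Option.getD_some, pvMaxStep]
      split_ifs with h1 <;> simp [PySem.Dict.get?_insert_self, h] <;> contradiction
  · split_ifs <;> simp [PySem.Dict.get?_insert_of_ne _ _ hc]

theorem pvAStep_keys (d : PySem.Dict String Int) (p : String × Int) :
    (pvAStep d p).keys = PySem.Set.add d.keys p.1 := by
  unfold pvAStep
  by_cases h : d.contains p.1
  · have hm : p.1 ∈ d.keys := (PySem.Dict.contains_iff_mem_keys _ _).1 h
    split_ifs with h1 h2 <;>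
      simp_all [PySem.Dict.keys_insert_of_contains, PySem.Set.add_of_mem]
  · have hf : d.contains p.1 = false := eq_false_of_ne_true h
    have hm : p.1 ∉ d.keys := fun hm => h ((PySem.Dict.contains_iff_mem_keys _ _).2 hm)
    simp [hf, PySem.Dict.keys_insert_of_not_contains _ _ hf, PySem.Set.add_of_not_mem hm]

theorem pvRound_keys (round : List (String × Int)) (d : PySem.Dict String Int) :
    (round.foldl pvAStep d).keys = PySem.Set.update d.keys (round.map Prod.fst) := by
  induction round generalizing d with
  | nil => simp [PySem.Set.update]
  | cons p rest ih =>
    simp only [List.foldl_cons, List.map_cons, PySem.Set.update_cons, ih, pvAStep_keys]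

theorem pvInner_keys (rounds : List (List (String × Int))) (d : PySem.Dict String Int) :
    (rounds.foldl (fun d round => round.foldl pvAStep d) d).keys
      = PySem.Set.update d.keys (rounds.flatMap (fun r => r.map Prod.fst)) := by
  induction rounds generalizing d with
  | nil => simp [PySem.Set.update]
  | cons r rest ih =>
    simp only [List.foldl_cons, List.flatMap_cons, PySem.Set.update_append, ih, pvRound_keys]

-- a fold over pairs none of which carries key c leaves get? c unchanged
theorem pvRound_get?_skip (round : List (String × Int)) (d : PySem.Dict String Int)
    (c : String) (h : c ∉ round.map Prod.fst) :
    (round.foldl pvAStep d).get? c = d.get? c := by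
  induction round generalizing d with
  | nil => rfl
  | cons p rest ih =>
    simp only [List.map_cons, List.mem_cons, not_or] at h
    simp only [List.foldl_cons, ih _ h.2, pvAStep_get?, if_neg h.1]

theorem pvRound_get? (round : List (String × Int)) (d : PySem.Dict String Int)
    (c : String) (hnd : (round.map Prod.fst).Nodup) :
    (round.foldl pvAStep d).get? c =
      match round.lookup c with
      | some v => pvMaxStep (d.get? c) v
      | none => d.get? c := by
  induction round generalizing d with
  | nil => rfl
  | cons p rest ih =>
    simp only [List.map_cons, List.nodup_cons] at hnd
    by_cases hc : c = p.1
    · subst hc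
      rw [List.foldl_cons, pvRound_get?_skip rest _ _ hnd.1, pvAStep_get?]
      simp [List.lookup]
    · have hne : (c == p.1) = false := by simp [hc]
      simp only [List.foldl_cons, ih _ hnd.2, pvAStep_get?, if_neg hc, List.lookup, hne]
theorem pvInner_get? (rounds : List (List (String × Int))) (d : PySem.Dict String Int)
    (c : String) (hnd : ∀ r ∈ rounds, (r.map Prod.fst).Nodup) :
    (rounds.foldl (fun d round => round.foldl pvAStep d) d).get? c =
      (rounds.filterMap (fun r => r.lookup c)).foldl pvMaxStep (d.get? c) := by
  induction rounds generalizing d with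
  | nil => rfl
  | cons r rest ih =>
    simp only [List.foldl_cons, List.filterMap_cons]
    rw [ih _ (fun r hr => hnd r (List.mem_cons_of_mem _ hr)),
      pvRound_get? r d c (hnd r (List.mem_cons_self))]
    cases h : r.lookup c <;> simp

-- B's filtered-max source list is exactly the filterMap of lookups
theorem pvVals_eq (rounds : List (List (String × Int))) (c : String) :
    (rounds.filter (fun r => (r.lookup c).isSome)).map (fun r => (r.lookup c).getD 0)
      = rounds.filterMap (fun r => r.lookup c) := by
  induction rounds with
  | nil => rfl
  | cons r rest ih =>
    cases h : r.lookup c <;> simp [h, ih]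

-- folding pvMaxStep from none is PySem.List.max? with the identity key
theorem pvMaxStep_fold (xs : List Int) :
    xs.foldl pvMaxStep none = PySem.List.max? xs id := by
  rw [PySem.List.max?]
  apply List.foldl_ext
  intro o v _
  cases o with
  | none => rfl
  | some w => simp [pvMaxStep]

theorem pvInner_items (rounds : List (List (String × Int)))
    (hnd : ∀ r ∈ rounds, (r.map Prod.fst).Nodup) :
    (pvAInner rounds).items = pvBInner rounds := by
  have hk : (pvAInner rounds).keys
      = PySem.List.dedup (rounds.flatMap (fun r => r.map Prod.fst)) := by
    rw [pvAInner, pvInner_keys, PySem.List.dedup]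
    simp [PySem.Set.update_nil_left]
  have hnodup : (pvAInner rounds).keys.Nodup := by
    rw [hk, PySem.List.dedup]; exact PySem.Set.nodup_ofList _
  rw [PySem.Dict.items_eq_map_keys _ hnodup 0, hk, pvBInner]
  apply List.map_congr_left
  intro c _
  rw [PySem.Dict.getD_eq_get?_getD, pvAInner, pvInner_get? _ _ _ hnd,
    PySem.Dict.get?_empty, pvMaxStep_fold, pvVals_eq]

theorem pvOuter (games : List (Int × List (List (String × Int))))
    (dA : PySem.Dict Int (PySem.Dict String Int)) (dB : PySem.Dict Int (List (String × Int)))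
    (hd : dB.items = dA.items.map (fun p => (p.1, p.2.items)))
    (h : ∀ g ∈ games, pvBInner g.2 = (pvAInner g.2).items) :
    (games.foldl (fun acc g => acc.insert g.1 (pvAInner g.2)) dA).items.map (fun p => (p.1, p.2.items))
      = (games.foldl (fun acc g => acc.insert g.1 (pvBInner g.2)) dB).items := by
  induction games generalizing dA dB with
  | nil => exact hd.symm
  | cons g rest ih =>
    simp only [List.foldl_cons]
    apply ih
    · have hvB : pvBInner g.2 = (pvAInner g.2).items := h g List.mem_cons_self
      have hcont : dB.contains g.1 = dA.contains g.1 := by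
        rw [PySem.Dict.contains, PySem.Dict.contains, hd, List.any_map]
        rfl
      cases hca : dA.contains g.1 with
      | false =>
        rw [PySem.Dict.items_insert_of_not_contains _ _ (hcont.trans hca),
          PySem.Dict.items_insert_of_not_contains _ _ hca, hd, hvB, List.map_append]
        rfl
      | true =>
        rw [PySem.Dict.items_insert_of_contains _ _ (hcont.trans hca),
          PySem.Dict.items_insert_of_contains _ _ hca, hd, List.map_map, List.map_map]
        apply List.map_congr_left
        intro p _
        by_cases hp : p.1 = g.1 <;> simp [hp, Function.comp, hvB]
    · exact fun g' hg' => h g' (List.mem_cons_of_mem _ hg')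

-- ===== VERDICT (by name: the statement is the Claim_ definition above) =====
theorem calculate_minimum_bag_contents_spec : Claim_equal_calculate_minimum_bag_contents := by
  intro games _ hpre
  unfold Spec_calculate_minimum_bag_contents calculate_minimum_bag_contents calculate_minimum_bag_contents_alt
  exact (pvOuter games PySem.Dict.empty PySem.Dict.empty rfl
    (fun g hg => (pvInner_items g.2 (fun r hr => hpre g hg r hr)).symm))
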